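-- pv_equiv track=rewrite | github.com/TarunGopinath6/qr_code_multiplexing | Final_qr_decoding.py | split_colors
-- ===== SOURCE A (Python) =====
-- def split_colors(input_string):
--     output_list = []
--     current_element = ""
--
--     for char in input_string:
--         current_element += char
--         if current_element == "0":
--             output_list.append(0)
--             current_element = ""
--         elif current_element == "255":
--             output_list.append(255)
--             current_element = ""
--
--     if current_element:
--         output_list.append(int(current_element))
--     return output_list
-- ===== SOURCE B (Python) =====
-- def split_colors(input_string):
--     out = []
--     i = 0
--     n = len(input_string)
--     while i < n:
--         if input_string[i] == '0':
--             out.append(0)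
--             i += 1
--         elif input_string[i] == '2' and input_string[i:i+3] == '255':
--             out.append(255)
--             i += 3
--         else:
--             out.append(int(input_string[i:]))
--             break
--     return out
-- ===== Notes on version B (the rewrite author's own statement) =====
-- stated objective: simpler
-- what changed: Replaced A's char-by-char buffer accumulation with string comparisons by an index-based greedy parser that consumes '0' or a '255' lookahead per step and collapses the remainder into a single int() with an explicit break.
import Mathlib
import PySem

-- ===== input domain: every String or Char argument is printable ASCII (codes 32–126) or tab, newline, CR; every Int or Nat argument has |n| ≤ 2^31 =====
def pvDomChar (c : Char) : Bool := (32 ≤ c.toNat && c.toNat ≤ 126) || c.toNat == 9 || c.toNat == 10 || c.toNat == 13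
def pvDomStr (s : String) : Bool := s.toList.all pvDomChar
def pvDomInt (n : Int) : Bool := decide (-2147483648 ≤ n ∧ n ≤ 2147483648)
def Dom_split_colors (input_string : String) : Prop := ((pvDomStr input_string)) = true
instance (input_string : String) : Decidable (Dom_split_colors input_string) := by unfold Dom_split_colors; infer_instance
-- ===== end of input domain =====

-- B replaces A's grow-a-buffer-and-compare scan by an index/lookahead greedy parser with an
-- explicit remainder branch (objective: simpler; no speed claim).

-- ===== PORT A =====
-- int(current_element); Pre_ excludes the inputs where Python's int() raises ValueError
def pvIntOf (cs : List Char) : Int := (PySem.Int.ofStr? (String.mk cs)).getD 0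

-- one iteration of A's for-loop: state = (output_list, current_element)
def pvAStep (st : List Int × List Char) (c : Char) : List Int × List Char :=
  let cur := st.2 ++ [c]
  if cur = ['0'] then (st.1 ++ [(0 : Int)], [])
  else if cur = ['2', '5', '5'] then (st.1 ++ [(255 : Int)], [])
  else (st.1, cur)

def split_colors (input_string : String) : List Int :=
  let st := input_string.toList.foldl pvAStep ([], [])
  if st.2 ≠ [] then st.1 ++ [pvIntOf st.2] else st.1

-- ===== PORT B =====
-- Source B's while-loop over index i, written as recursion on the suffix input_string[i:]
def pvBGo : List Char → List Int
  | [] => []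
  | '0' :: rest => (0 : Int) :: pvBGo rest
  | '2' :: '5' :: '5' :: rest => (255 : Int) :: pvBGo rest
  | cs => [pvIntOf cs]   -- remainder branch: int(input_string[i:]) then break

def split_colors_alt (input_string : String) : List Int := pvBGo input_string.toList

-- ===== PRECONDITION & SPEC =====
-- the leftover suffix after the leading "0"/"255" tokens (the only place int() is applied)
def pvRest : List Char → List Char
  | [] => []
  | '0' :: rest => pvRest rest
  | '2' :: '5' :: '5' :: rest => pvRest rest
  | cs => cs

-- Pre_ excludes exactly the inputs where Python's int() on the leftover suffix raises ValueError
-- (both A and B raise there); pvRest only names that suffix, it computes no output.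
def Pre_split_colors (input_string : String) : Prop :=
  pvRest input_string.toList = [] ∨ (PySem.Int.ofStr? (String.mk (pvRest input_string.toList))).isSome = true
instance (input_string : String) : Decidable (Pre_split_colors input_string) := by
  unfold Pre_split_colors; infer_instance

def pvWitness_split_colors : String := "02550 37 "

def Spec_split_colors (input_string : String) (out : List Int) : Prop := out = split_colors_alt input_string
instance (input_string : String) (out : List Int) : Decidable (Spec_split_colors input_string out) := by unfold Spec_split_colors; infer_instance

-- ===== CLAIM (what is proved, stated in full; the proofs are below) =====
def Claim_equal_split_colors : Prop := ∀ (input_string : String), Dom_split_colors input_string → Pre_split_colors input_string → Spec_split_colors input_string (split_colors input_string)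

-- ===== LEMMAS AND PROOFS =====

def pvFin (st : List Int × List Char) : List Int :=
  if st.2 ≠ [] then st.1 ++ [pvIntOf st.2] else st.1

-- once the buffer is not a proper prefix of a token, it can never reset again
theorem pvFoldl_stuck (cs : List Char) (acc : List Int) (b : List Char)
    (h1 : b ≠ []) (h2 : b ≠ ['2']) (h3 : b ≠ ['2', '5']) :
    List.foldl pvAStep (acc, b) cs = (acc, b ++ cs) := by
  induction cs generalizing b with
  | nil => simp
  | cons c rest ih =>
      have hstep : pvAStep (acc, b) c = (acc, b ++ [c]) := by
        have hn0 : b ++ [c] ≠ ['0'] := by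
          intro h
          have : b.length + 1 = 1 := by simpa using congrArg List.length h
          exact h1 (List.eq_nil_of_length_eq_zero (by omega))
        have hn255 : b ++ [c] ≠ ['2', '5', '5'] := by
          intro h
          match b, h1, h2, h3 with
          | [x], _, _, _ => simp at h
          | [x, y], _, _, hxy =>
              simp at h
              exact hxy (by simp [h.1, h.2.1])
          | x :: y :: z :: t, _, _, _ =>
              have := congrArg List.length h
              simp at this
        simp [pvAStep, hn0, hn255]
      rw [List.foldl_cons, hstep, ih (b ++ [c]) (by simp)
            (by intro h
                have := congrArg List.length h
                simp at this
                exact h1 this)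
            (by intro h
                match b, h1, h2 with
                | [x], _, hx =>
                    simp at h
                    exact hx (by simp [h.1])
                | x :: y :: t, _, _ =>
                    have := congrArg List.length h
                    simp at this)]
      simp

theorem pvMain (cs : List Char) (acc : List Int) :
    pvFin (List.foldl pvAStep (acc, []) cs) = acc ++ pvBGo cs := by
  fun_induction pvBGo cs generalizing acc with
  | case1 => simp [pvFin]
  | case2 rest ih =>
      have : pvAStep (acc, []) '0' = (acc ++ [(0 : Int)], []) := by simp [pvAStep]
      rw [List.foldl_cons, this, ih (acc := acc ++ [(0 : Int)])]
      simp
  | case3 rest ih =>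
      have h1 : pvAStep (acc, []) '2' = (acc, ['2']) := by simp [pvAStep]
      have h2 : pvAStep (acc, ['2']) '5' = (acc, ['2', '5']) := by simp [pvAStep]
      have h3 : pvAStep (acc, ['2', '5']) '5' = (acc ++ [(255 : Int)], []) := by simp [pvAStep]
      rw [List.foldl_cons, h1, List.foldl_cons, h2, List.foldl_cons, h3,
          ih (acc := acc ++ [(255 : Int)])]
      simp
  | case4 cs hne h0 h255 =>
      -- remainder: the buffer never resets again; A appends int(cs), B returns [int cs]
      match cs, hne, h0, h255 with
      | c :: rest, _, hc0, hc255 =>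
        by_cases hc2 : c = '2'
        · subst hc2
          match rest with
          | [] =>
              simp [pvAStep, pvFin, pvIntOf]
          | d :: rest2 =>
            by_cases hd5 : d = '5'
            · subst hd5
              match rest2 with
              | [] =>
                  simp [pvAStep, pvFin, pvIntOf]
              | e :: rest3 =>
                have he5 : e ≠ '5' := by
                  intro h; subst h; exact hc255 rest3 rfl
                have hs1 : pvAStep (acc, []) '2' = (acc, ['2']) := by simp [pvAStep]
                have hs2 : pvAStep (acc, ['2']) '5' = (acc, ['2', '5']) := by simp [pvAStep]
                have hs3 : pvAStep (acc, ['2', '5']) e = (acc, ['2', '5', e]) := by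
                  simp [pvAStep, he5]
                rw [List.foldl_cons, hs1, List.foldl_cons, hs2, List.foldl_cons, hs3,
                    pvFoldl_stuck rest3 acc ['2', '5', e] (by simp) (by simp) (by simp)]
                simp [pvFin]
            · have hs1 : pvAStep (acc, []) '2' = (acc, ['2']) := by simp [pvAStep]
              have hs2 : pvAStep (acc, ['2']) d = (acc, ['2', d]) := by
                simp [pvAStep, hd5]
              rw [List.foldl_cons, hs1, List.foldl_cons, hs2,
                  pvFoldl_stuck rest2 acc ['2', d] (by simp) (by simp) (by simp [hd5])]
              simp [pvFin]
        · have hcne0 : c ≠ '0' := by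
            intro h; subst h; exact hc0 rest rfl
          have hs1 : pvAStep (acc, []) c = (acc, [c]) := by
            simp [pvAStep, hcne0, hc2]
          rw [List.foldl_cons, hs1,
              pvFoldl_stuck rest acc [c] (by simp) (by simp [hc2]) (by simp)]
          simp [pvFin]

-- ===== VERDICT (by name: the statement is the Claim_ definition above) =====
theorem split_colors_spec : Claim_equal_split_colors := by
  intro s _ _
  show split_colors s = split_colors_alt s
  have := pvMain s.toList []
  simpa [split_colors, split_colors_alt, pvFin] using this
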